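-- pv_equiv track=rewrite | github.com/nguyennghia0902/MyStructFile | components/login.py | decrypt_dynamic_password
-- ===== SOURCE A (Python) =====
-- def decrypt_dynamic_password(s):
--     offset = ord('A')
--     t = s[0]
--     for i in range(len(s))[1:]:
--         cur = ord(s[i]) - offset
--         last = ord(t[-1]) - offset
--         c = chr((cur + last + 1) % 26 + offset)
--         t += c
--     return t
-- ===== SOURCE B (Python) =====
-- def decrypt_dynamic_password(s):
--     offset = ord('A')
--     out = [s[0]]
--     for i in range(1, len(s)):
--         total = sum(ord(c) - offset for c in s[:i + 1]) + i
--         out.append(chr(total % 26 + offset))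
--     return ''.join(out)
-- ===== Notes on version B (the rewrite author's own statement) =====
-- stated objective: alternative
-- what changed: B drops A's self-referential recurrence (each new character computed from the previously decrypted character) and instead computes every output character independently from the closed form (sum of (ord(c)-offset) over the prefix s[:i+1] plus i) mod 26, carrying no state between iterations.
import Mathlib
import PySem

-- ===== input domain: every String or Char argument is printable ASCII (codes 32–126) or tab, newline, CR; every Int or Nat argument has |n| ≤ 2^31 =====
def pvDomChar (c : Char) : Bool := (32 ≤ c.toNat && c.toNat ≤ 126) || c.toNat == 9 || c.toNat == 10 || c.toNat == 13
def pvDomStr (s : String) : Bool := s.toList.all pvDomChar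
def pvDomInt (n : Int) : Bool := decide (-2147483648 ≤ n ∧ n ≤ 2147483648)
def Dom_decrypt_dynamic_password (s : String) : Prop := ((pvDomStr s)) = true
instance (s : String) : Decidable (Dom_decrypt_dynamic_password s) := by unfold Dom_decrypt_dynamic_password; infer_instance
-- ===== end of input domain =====

-- B replaces A's self-referential recurrence (reading the last output character) by a memoryless
-- per-index closed form over the input prefix; return values proved equal on all nonempty strings
-- (A raises IndexError on "").

-- ===== PORT A =====
-- one loop step of A: t[-1] is always in range (t starts nonempty and only grows),
-- so pyGetD with a dummy default is exact here
def pvStepA (t : List Char) (c : Char) : List Char :=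
  let cur : Int := (c.toNat : Int) - 65
  let last : Int := ((PySem.List.pyGetD t (-1) ' ').toNat : Int) - 65
  t ++ [Char.ofNat ((cur + last + 1) % 26 + 65).toNat]

def decrypt_dynamic_password (s : String) : String :=
  let cs := s.toList
  match cs with
  | [] => ""          -- s[0] raises IndexError in Python; excluded by Pre_
  | c0 :: _ =>
    -- for i in range(len(s))[1:] : body reads s[i]; the index is always in range, so getD ' ' is exact
    let idxs := PySem.List.slice (PySem.List.pyRange 0 (cs.length : Int) 1) (some 1) none
    let t := idxs.foldl (fun t i => pvStepA t ((PySem.List.pyGet? cs i).getD ' ')) [c0]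
    String.ofList t

-- ===== PORT B =====
-- one loop step of B over the index i: the character is the closed form
-- (sum over the prefix cs[:i+1] of (ord c − 65), plus i) mod 26, no state carried between steps
def pvStepBi (cs : List Char) (out : List Char) (i : Int) : List Char :=
  let total : Int :=
    (PySem.List.slice cs none (some (i + 1))).foldl (fun a c => a + ((c.toNat : Int) - 65)) 0 + i
  out ++ [Char.ofNat (total % 26 + 65).toNat]

def decrypt_dynamic_password_alt (s : String) : String :=
  let cs := s.toList
  match cs with
  | [] => ""          -- s[0] raises IndexError in Python; excluded by Pre_
  | c0 :: _ =>
    let out := (PySem.List.pyRange 1 (cs.length : Int) 1).foldl (pvStepBi cs) [c0]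
    String.ofList out

-- ===== PRECONDITION & SPEC =====
-- A raises IndexError on the empty string (s[0]); that is the only exception, so Pre_ is nonemptiness.
def Pre_decrypt_dynamic_password (s : String) : Prop := s ≠ ""
instance (s : String) : Decidable (Pre_decrypt_dynamic_password s) := by unfold Pre_decrypt_dynamic_password; infer_instance
def pvWitness_decrypt_dynamic_password : String := "Ab z"

def Spec_decrypt_dynamic_password (s : String) (out : String) : Prop := out = decrypt_dynamic_password_alt s
instance (s : String) (out : String) : Decidable (Spec_decrypt_dynamic_password s out) := by unfold Spec_decrypt_dynamic_password; infer_instance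

-- ===== CLAIM (what is proved, stated in full; the proofs are below) =====
def Claim_equal_decrypt_dynamic_password : Prop := ∀ (s : String), Dom_decrypt_dynamic_password s → Pre_decrypt_dynamic_password s → Spec_decrypt_dynamic_password s (decrypt_dynamic_password s)

-- ===== LEMMAS AND PROOFS =====

def pvSumV (l : List Char) : Int := l.foldl (fun a c => a + ((c.toNat : Int) - 65)) 0

theorem pv_char_toNat (n : Nat) (h : n < 55296) : (Char.ofNat n).toNat = n := by
  simp [Char.ofNat, Char.ofNatAux, Nat.isValidChar, h]

theorem pvSumV_append (l : List Char) (c : Char) :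
    pvSumV (l ++ [c]) = pvSumV l + ((c.toNat : Int) - 65) := by
  simp [pvSumV]

-- A's index-driven fold over range(len(s))[1:] is the direct fold over the tail characters
theorem pv_index_fold (rest : List Char) : ∀ (pre t : List Char),
    (PySem.List.pyRange (pre.length : Int) ((pre.length : Int) + (rest.length : Int)) 1).foldl
      (fun t i => pvStepA t ((PySem.List.pyGet? (pre ++ rest) i).getD ' ')) t
    = rest.foldl pvStepA t := by
  induction rest with
  | nil => intro pre t; simp
  | cons c rest ih =>
    intro pre t
    rw [PySem.List.pyRange_one_cons (by push_cast [List.length_cons]; omega)]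
    simp only [List.foldl_cons, PySem.List.pyGet?_append_length, Option.getD_some]
    have hb : (pre.length : Int) + ((c :: rest).length : Int)
        = ((pre.length : Int) + 1) + (rest.length : Int) := by
      push_cast [List.length_cons]; ring
    rw [hb]
    have h := ih (pre ++ [c]) (pvStepA t c)
    have hlen : ((pre ++ [c]).length : Int) = (pre.length : Int) + 1 := by simp
    rw [hlen] at h
    simpa [List.append_assoc] using h

-- the main invariant: A's char fold on the tail equals B's index fold, starting after prefix 'pre';
-- the last character of t encodes (pvSumV pre + pre.length − 1) mod 26
theorem pv_main (rest : List Char) : ∀ (pre t : List Char),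
    pre ≠ [] → t ≠ [] →
    ((PySem.List.pyGetD t (-1) ' ').toNat : Int) % 26
      = (pvSumV pre + (pre.length : Int) - 1 + 65) % 26 →
    rest.foldl pvStepA t
    = (PySem.List.pyRange (pre.length : Int) ((pre.length : Int) + (rest.length : Int)) 1).foldl
        (pvStepBi (pre ++ rest)) t := by
  induction rest with
  | nil => intro pre t _ _ _; simp
  | cons c rest ih =>
    intro pre t hpre ht hinv
    rw [PySem.List.pyRange_one_cons (by push_cast [List.length_cons]; omega)]
    simp only [List.foldl_cons]
    set cur : Int := (c.toNat : Int) - 65 with hcur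
    -- the new appended character is the same on both sides
    have htake : (pre ++ c :: rest).take (pre.length + 1) = pre ++ [c] := by
      rw [show pre.length + 1 = pre.length + 1 from rfl]
      rw [List.take_append]
      simp
    have hslice : PySem.List.slice (pre ++ c :: rest) none (some ((pre.length : Int) + 1))
        = pre ++ [c] := by
      have : (pre.length : Int) + 1 = ((pre.length + 1 : Nat) : Int) := by push_cast; ring
      rw [this, PySem.List.slice_to_natCast, htake]
    have htotal : (PySem.List.slice (pre ++ c :: rest) none (some ((pre.length : Int) + 1))).foldl
          (fun a c => a + ((c.toNat : Int) - 65)) 0 + (pre.length : Int)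
        = pvSumV pre + cur + (pre.length : Int) := by
      rw [hslice]
      have h1 := pvSumV_append pre c
      simp only [pvSumV] at h1
      rw [h1]
      show pvSumV pre + ((c.toNat : Int) - 65) + (pre.length : Int)
        = pvSumV pre + cur + (pre.length : Int)
      rw [hcur]
    set m : Int := (pvSumV pre + cur + (pre.length : Int)) % 26 with hm
    have hmod : (cur + (((PySem.List.pyGetD t (-1) ' ').toNat : Int) - 65) + 1) % 26 = m := by
      rw [hm]; omega
    have hA : pvStepA t c = t ++ [Char.ofNat (m + 65).toNat] := by
      simp only [pvStepA, ← hcur]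
      rw [hmod]
    have hB : pvStepBi (pre ++ c :: rest) t (pre.length : Int)
        = t ++ [Char.ofNat (m + 65).toNat] := by
      simp only [pvStepBi]
      rw [htotal, ← hm]
    rw [hA, hB]
    have hb : (pre.length : Int) + ((c :: rest).length : Int)
        = (((pre ++ [c]).length : Int)) + (rest.length : Int) := by
      simp only [List.length_cons, List.length_append, List.length_nil]
      push_cast; ring
    rw [hb]
    have h := ih (pre ++ [c]) (t ++ [Char.ofNat (m + 65).toNat]) (by simp) (by simp)
      (by
        rw [PySem.List.pyGetD_neg_one_append_singleton]
        have hval : (Char.ofNat (m + 65).toNat).toNat = (m + 65).toNat := by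
          apply pv_char_toNat; omega
        rw [hval, pvSumV_append]
        simp only [List.length_append, List.length_cons, List.length_nil]
        push_cast
        omega)
    have hlen : ((pre ++ [c]).length : Int) = (pre.length : Int) + 1 := by simp
    rw [hlen] at h ⊢
    simpa [List.append_assoc] using h

-- ===== VERDICT (by name: the statement is the Claim_ definition above) =====
theorem decrypt_dynamic_password_spec : Claim_equal_decrypt_dynamic_password := by
  unfold Claim_equal_decrypt_dynamic_password
  intro s _ hpre
  unfold Spec_decrypt_dynamic_password decrypt_dynamic_password decrypt_dynamic_password_alt
  have hs : s.toList ≠ [] := fun h => hpre (by simpa using h)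
  cases hcs : s.toList with
  | nil => exact absurd hcs hs
  | cons c0 rest =>
    simp only []
    have hidx : PySem.List.slice (PySem.List.pyRange 0 (((c0 :: rest).length : Nat) : Int) 1) (some 1) none
        = PySem.List.pyRange 1 (((c0 :: rest).length : Nat) : Int) 1 := by
      rw [PySem.List.slice_from_one,
        PySem.List.pyRange_one_cons (by push_cast [List.length_cons]; omega)]
      rfl
    rw [hidx]
    have hlen : (((c0 :: rest).length : Nat) : Int)
        = (([c0] : List Char).length : Int) + (rest.length : Int) := by
      simp; ring
    rw [hlen]
    have h1 := pv_index_fold rest [c0] [c0]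
    simp only [List.length_singleton, Nat.cast_one, List.singleton_append] at h1 ⊢
    rw [h1]
    have h2 := pv_main rest [c0] [c0] (by simp) (by simp)
      (by simp [PySem.List.pyGetD, PySem.List.pyGet?_neg_one, pvSumV])
    simp only [List.length_singleton, Nat.cast_one, List.singleton_append] at h2
    rw [h2]
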